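-- pv_equiv track=rewrite | github.com/lz0104132490/6447_Fuzzer | 123.py | _looks_like_numeric_key_object
-- ===== SOURCE A (Python) =====
-- def _looks_like_numeric_key_object(obj):
--     if not isinstance(obj, dict) or not obj:
--         return False
--     keys = list(obj.keys())
--     if not all(isinstance(k, str) and k.isdigit() for k in keys):
--         return False
--     ints = sorted(int(k) for k in keys)
--     return ints == list(range(len(keys))) and len(keys) >= 3
-- ===== SOURCE B (Python) =====
-- def _looks_like_numeric_key_object(obj):
--     # Counting-sort-style marking: one pass over the keys, mark each int in a
--     # bytearray of size n; reject out-of-range or repeated values.  If the pass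
--     # survives, the n keys hit n distinct slots of 0..n-1, i.e. all of them.
--     if not isinstance(obj, dict):
--         return False
--     n = len(obj)
--     if n < 3:
--         return False
--     seen = bytearray(n)
--     for k in obj:
--         if not (isinstance(k, str) and k.isdigit()):
--             return False
--         v = int(k)
--         if not 0 <= v < n or seen[v]:
--             return False
--         seen[v] = 1
--     return True
-- ===== Notes on version B (the rewrite author's own statement) =====
-- stated objective: alternative
-- what changed: Replaced sort-then-compare-to-range(n) by counting-sort-style marking: one pass marks each int(k) in a bytearray of size n, rejecting out-of-range or repeated values, and returns True with no final comparison (pigeonhole: n distinct hits in 0..n-1 cover all of it).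
import Mathlib
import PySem

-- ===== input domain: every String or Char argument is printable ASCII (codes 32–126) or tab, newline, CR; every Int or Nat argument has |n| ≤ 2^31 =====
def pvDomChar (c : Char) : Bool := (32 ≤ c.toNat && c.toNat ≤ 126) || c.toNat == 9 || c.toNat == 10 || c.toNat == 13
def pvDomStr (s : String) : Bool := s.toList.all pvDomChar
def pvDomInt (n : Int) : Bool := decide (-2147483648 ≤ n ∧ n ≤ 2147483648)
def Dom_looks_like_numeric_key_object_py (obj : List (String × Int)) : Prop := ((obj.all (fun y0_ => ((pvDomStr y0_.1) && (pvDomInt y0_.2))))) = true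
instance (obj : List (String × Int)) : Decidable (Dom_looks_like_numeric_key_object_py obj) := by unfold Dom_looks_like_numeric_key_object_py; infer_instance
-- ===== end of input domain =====

-- B replaces A's sort-and-compare-to-range by counting-sort-style marking: one pass marks each
-- int(k) in an array of size n, rejecting out-of-range or repeated values (alternative, no sort).
-- ===== PORT A =====
-- int(k) is only reached when k.isdigit(), so ofStr? is some; getD 0 is the unreachable default.
def pvIntOf (k : String) : Int := (PySem.Int.ofStr? k).getD 0

def looks_like_numeric_key_object_py (obj : List (String × Int)) : Bool :=
  if obj.isEmpty then false
  else
    let keys := PySem.List.dedup (obj.map Prod.fst)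
    if !(keys.all (fun k => PySem.Str.strIsdigit k)) then false
    else
      let ints := PySem.List.sorted (keys.map pvIntOf) (fun x => x) false
      decide (ints = PySem.List.pyRange 0 (keys.length : Int) 1) && decide (keys.length ≥ 3)

-- ===== PORT B =====
-- the for-loop of Source B: `seen` is the bytearray (List Bool); early return False on a non-digit
-- key or on `not 0 <= v < n or seen[v]`; indexing seen[v] with 0 ≤ v < n is exactly getD v.toNat.
def pvMarkLoop (n : Nat) : List String → List Bool → Bool
  | [], _ => true
  | k :: ks, seen =>
    if PySem.Str.strIsdigit k then
      let v := pvIntOf k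
      if !(decide (0 ≤ v) && decide (v < (n : Int))) || seen.getD v.toNat false then false
      else pvMarkLoop n ks (seen.set v.toNat true)
    else false

def looks_like_numeric_key_object_py_alt (obj : List (String × Int)) : Bool :=
  let keys := PySem.List.dedup (obj.map Prod.fst)
  let n := keys.length
  if n < 3 then false
  else pvMarkLoop n keys (List.replicate n false)

-- ===== PRECONDITION & SPEC =====
def Spec_looks_like_numeric_key_object_py (obj : List (String × Int)) (out : Bool) : Prop := out = looks_like_numeric_key_object_py_alt obj
instance (obj : List (String × Int)) (out : Bool) : Decidable (Spec_looks_like_numeric_key_object_py obj out) := by unfold Spec_looks_like_numeric_key_object_py; infer_instance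

-- ===== CLAIM (what is proved, stated in full; the proofs are below) =====
def Claim_equal_looks_like_numeric_key_object_py : Prop := ∀ (obj : List (String × Int)), Dom_looks_like_numeric_key_object_py obj → Spec_looks_like_numeric_key_object_py obj (looks_like_numeric_key_object_py obj)

-- ===== LEMMAS AND PROOFS =====

lemma pv_getD_set (l : List Bool) (j i : Nat) (hj : j < l.length) :
    (l.set j true).getD i false = if j = i then true else l.getD i false := by
  simp [List.getD, List.getElem?_set]
  split_ifs with h1 <;> simp_all

lemma pv_getD_replicate (n i : Nat) : (List.replicate n false).getD i false = false := by
  simp [List.getD, List.getElem?_replicate]; split <;> simp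

-- the marking loop succeeds iff every key is a digit string with a fresh int in [0, n)
lemma pvMarkLoop_iff (n : Nat) (ks : List String) (seen : List Bool) (hlen : seen.length = n) :
    pvMarkLoop n ks seen = true ↔
      ((∀ k ∈ ks, PySem.Str.strIsdigit k = true) ∧ (ks.map pvIntOf).Nodup ∧
        ∀ k ∈ ks, 0 ≤ pvIntOf k ∧ pvIntOf k < (n : Int) ∧
          seen.getD (pvIntOf k).toNat false = false) := by
  induction ks generalizing seen with
  | nil => simp [pvMarkLoop]
  | cons k ks ih =>
    simp only [pvMarkLoop]
    by_cases hd : PySem.Str.strIsdigit k = true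
    · rw [if_pos hd]
      by_cases hg : (0 ≤ pvIntOf k ∧ pvIntOf k < (n : Int)) ∧
          seen.getD (pvIntOf k).toNat false = false
      · obtain ⟨⟨hv0, hvn⟩, hvs⟩ := hg
        have hcond : (!(decide (0 ≤ pvIntOf k) && decide (pvIntOf k < (n : Int))) ||
            seen.getD (pvIntOf k).toNat false) = false := by
          simp only [hv0, hvn, decide_true, Bool.and_self, Bool.not_true, Bool.false_or]
          exact hvs
        rw [hcond]
        simp only [Bool.false_eq_true, if_false]
        have hjlt : (pvIntOf k).toNat < seen.length := by omega
        rw [ih _ (by simp [hlen])]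
        constructor
        · rintro ⟨hD, hN, hC⟩
          refine ⟨?_, ?_, ?_⟩
          · intro k' hk'
            rcases List.mem_cons.1 hk' with h | h
            · rw [h]; exact hd
            · exact hD k' h
          · simp only [List.map_cons, List.nodup_cons]
            refine ⟨?_, hN⟩
            intro hmem
            rcases List.mem_map.1 hmem with ⟨k', hk', hkv⟩
            have h2 := (hC k' hk').2.2
            rw [pv_getD_set _ _ _ hjlt] at h2
            rw [hkv] at h2
            simp at h2
          · intro k' hk'
            rcases List.mem_cons.1 hk' with h | h
            · rw [h]; exact ⟨hv0, hvn, hvs⟩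
            · obtain ⟨h0, h1, h2⟩ := hC k' h
              rw [pv_getD_set _ _ _ hjlt] at h2
              refine ⟨h0, h1, ?_⟩
              by_cases he : (pvIntOf k).toNat = (pvIntOf k').toNat
              · rw [if_pos he] at h2; cases h2
              · rwa [if_neg he] at h2
        · rintro ⟨hD, hN, hC⟩
          simp only [List.map_cons, List.nodup_cons] at hN
          refine ⟨fun k' h => hD k' (List.mem_cons_of_mem _ h), hN.2, ?_⟩
          intro k' hk'
          obtain ⟨h0, h1, h2⟩ := hC k' (List.mem_cons_of_mem _ hk')
          refine ⟨h0, h1, ?_⟩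
          rw [pv_getD_set _ _ _ hjlt]
          by_cases he : (pvIntOf k).toNat = (pvIntOf k').toNat
          · exfalso
            have : pvIntOf k' = pvIntOf k := by omega
            exact hN.1 (List.mem_map.2 ⟨k', hk', this⟩)
          · rw [if_neg he]; exact h2
      · have hcond : (!(decide (0 ≤ pvIntOf k) && decide (pvIntOf k < (n : Int))) ||
            seen.getD (pvIntOf k).toNat false) = true := by
          by_contra hc
          apply hg
          simp only [Bool.or_eq_true, not_or, Bool.not_eq_true, Bool.not_eq_false',
            Bool.and_eq_true, decide_eq_true_eq] at hc
          exact ⟨hc.1, hc.2⟩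
        rw [hcond]
        simp only [if_true]
        constructor
        · intro h; cases h
        · rintro ⟨hD, hN, hC⟩
          obtain ⟨h0, h1, h2⟩ := hC k (List.mem_cons_self ..)
          exact absurd ⟨⟨h0, h1⟩, h2⟩ hg
    · rw [if_neg hd]
      constructor
      · intro h; cases h
      · rintro ⟨hD, _, _⟩
        exact absurd (hD k (List.mem_cons_self ..)) hd

-- pigeonhole core: a list of n ints sorts to range(n) iff it is distinct and lands in [0, n)
lemma pv_sorted_iff_nodup_bounded (l : List Int) :
    (PySem.List.sorted l (fun x => x) false = PySem.List.pyRange 0 (l.length : Int) 1)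
      ↔ (l.Nodup ∧ ∀ x ∈ l, 0 ≤ x ∧ x < (l.length : Int)) := by
  constructor
  · intro h
    have hp := PySem.List.sorted_perm l (fun x => x) false
    rw [h] at hp
    refine ⟨hp.nodup (PySem.List.nodup_pyRange_one 0 (l.length : Int)), ?_⟩
    intro x hx
    have := hp.symm.mem_iff.1 hx
    exact PySem.List.mem_pyRange_one.1 this
  · rintro ⟨hnd, hb⟩
    have hsub : l ⊆ PySem.List.pyRange 0 (l.length : Int) 1 := by
      intro x hx
      exact PySem.List.mem_pyRange_one.2 (hb x hx)
    have hsp := List.subperm_of_subset hnd hsub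
    have hlen : (PySem.List.pyRange 0 (l.length : Int) 1).length = l.length := by
      rw [PySem.List.length_pyRange_one]; omega
    have hperm := hsp.perm_of_length_le (by omega)
    exact PySem.List.sorted_eq_of_perm_of_pairwise_lt _ _ _ hperm.symm
      (PySem.List.pairwise_lt_pyRange_one 0 (l.length : Int))

-- ===== VERDICT (by name: the statement is the Claim_ definition above) =====
theorem looks_like_numeric_key_object_py_spec : Claim_equal_looks_like_numeric_key_object_py := by
  intro obj _
  unfold Spec_looks_like_numeric_key_object_py
  unfold looks_like_numeric_key_object_py looks_like_numeric_key_object_py_alt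
  set keys := PySem.List.dedup (obj.map Prod.fst) with hkeys
  have hempty : obj.isEmpty = true ↔ keys = [] := by
    rw [List.isEmpty_iff, hkeys]
    cases obj with
    | nil => simp [PySem.List.dedup]
    | cons p rest =>
      constructor
      · intro h; simp at h
      · intro h
        have hm : p.1 ∈ PySem.List.dedup ((p :: rest).map Prod.fst) := by
          rw [PySem.List.mem_dedup]; simp
        rw [h] at hm; simp at hm
  by_cases hk3 : keys.length < 3
  · rw [if_pos hk3]
    cases ho : obj.isEmpty with
    | true => rw [if_pos rfl]
    | false =>
      rw [if_neg (by simp)]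
      by_cases hd : (keys.all fun k => PySem.Str.strIsdigit k) = true
      · rw [if_neg (by rw [hd]; simp)]
        have h3 : decide (keys.length ≥ 3) = false := by simp; omega
        rw [h3, Bool.and_false]
      · have hd' : (keys.all fun k => PySem.Str.strIsdigit k) = false := by simpa using hd
        rw [if_pos (by rw [hd']; rfl)]
  · -- n ≥ 3 on both sides
    have hne : obj.isEmpty = false := by
      cases h : obj.isEmpty
      · rfl
      · exfalso; have := hempty.1 h; rw [this] at hk3; simp at hk3
    rw [if_neg (by simp [hne]), if_neg hk3]
    rw [Bool.eq_iff_iff]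
    rw [pvMarkLoop_iff _ _ _ (List.length_replicate ..)]
    by_cases hd : (keys.all fun k => PySem.Str.strIsdigit k) = true
    · rw [if_neg (by rw [hd]; simp)]
      have hiff := pv_sorted_iff_nodup_bounded (keys.map pvIntOf)
      rw [List.length_map] at hiff
      constructor
      · intro h
        simp only [Bool.and_eq_true, decide_eq_true_eq] at h
        obtain ⟨hnd, hb⟩ := hiff.1 h.1
        refine ⟨fun k hk => by simpa using (List.all_eq_true.1 hd) k hk, hnd, ?_⟩
        intro k hk
        obtain ⟨h0, h1⟩ := hb (pvIntOf k) (List.mem_map.2 ⟨k, hk, rfl⟩)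
        exact ⟨h0, h1, pv_getD_replicate _ _⟩
      · rintro ⟨_, hnd, hC⟩
        simp only [Bool.and_eq_true, decide_eq_true_eq]
        refine ⟨hiff.2 ⟨hnd, ?_⟩, by omega⟩
        intro x hx
        rcases List.mem_map.1 hx with ⟨k, hk, rfl⟩
        exact ⟨(hC k hk).1, (hC k hk).2.1⟩
    · have hd' : (keys.all fun k => PySem.Str.strIsdigit k) = false := by simpa using hd
      rw [if_pos (by rw [hd']; rfl)]
      constructor
      · intro h; cases h
      · rintro ⟨hD, _, _⟩
        rw [List.all_eq_true] at hd
        exact absurd (fun k hk => by simpa using hD k hk) hd
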